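-- pv_equiv track=rewrite | github.com/Krai53n/pyxel_games | tic_tac_toe/tic_tac_toe.py | define_square
-- ===== SOURCE A (Python) =====
-- def define_square(x, y, x_begin=18, y_begin=18, x_move=38, y_move=38):
--     x_pos, y_pos = x_begin, y_begin
--     for sq in range(9):
--         if (sq % 3 == 0) and (sq != 0):
--             x_pos = x_begin
--             y_pos += y_move
--         if (x > x_pos and x < x_pos + x_move) and (y > y_pos and y < y_pos + y_move):
--             return sq, x_pos, y_pos
--         x_pos += x_move
--     return None
-- ===== SOURCE B (Python) =====
-- def define_square(x, y, x_begin=18, y_begin=18, x_move=38, y_move=38):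
--     if x_move <= 0 or y_move <= 0:
--         return None
--     col, cr = divmod(x - x_begin, x_move)
--     row, rr = divmod(y - y_begin, y_move)
--     if cr == 0 or rr == 0 or not (0 <= col <= 2 and 0 <= row <= 2):
--         return None
--     return row * 3 + col, x_begin + col * x_move, y_begin + row * y_move
-- ===== Notes on version B (the rewrite author's own statement) =====
-- stated objective: simpler
-- what changed: B locates the grid cell directly with one divmod per axis (col, row) instead of A's scan over the 9 squares, returning None on gridlines, outside the 3x3 range, or for non-positive step sizes.
import Mathlib
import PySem

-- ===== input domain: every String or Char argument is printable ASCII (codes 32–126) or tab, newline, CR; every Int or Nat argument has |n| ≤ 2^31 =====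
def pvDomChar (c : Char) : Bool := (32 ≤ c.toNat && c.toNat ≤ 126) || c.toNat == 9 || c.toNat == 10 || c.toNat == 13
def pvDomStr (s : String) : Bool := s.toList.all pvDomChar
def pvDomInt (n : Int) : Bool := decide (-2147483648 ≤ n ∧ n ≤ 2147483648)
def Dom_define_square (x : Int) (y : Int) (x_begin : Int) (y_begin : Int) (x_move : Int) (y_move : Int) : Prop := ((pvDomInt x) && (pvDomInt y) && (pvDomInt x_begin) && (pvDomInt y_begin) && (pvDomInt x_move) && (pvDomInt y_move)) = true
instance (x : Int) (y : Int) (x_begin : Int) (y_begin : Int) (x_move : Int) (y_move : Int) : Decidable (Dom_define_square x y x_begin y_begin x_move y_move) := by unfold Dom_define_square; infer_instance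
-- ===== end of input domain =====

-- B replaces A's 9-cell scan by direct divmod arithmetic locating the cell (objective: simpler).
-- ===== PORT A =====
-- the for-loop over range(9) with early return, carrying (x_pos, y_pos)
def pvLoopA (x y x_begin x_move y_move : Int) : List Int → Int → Int → Option (Int × Int × Int)
  | [], _, _ => none
  | sq :: rest, x_pos, y_pos =>
      let x_pos := if sq % 3 == 0 && sq != 0 then x_begin else x_pos
      let y_pos := if sq % 3 == 0 && sq != 0 then y_pos + y_move else y_pos
      if x > x_pos ∧ x < x_pos + x_move ∧ y > y_pos ∧ y < y_pos + y_move then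
        some (sq, x_pos, y_pos)
      else
        pvLoopA x y x_begin x_move y_move rest (x_pos + x_move) y_pos

def define_square (x : Int) (y : Int) (x_begin : Int) (y_begin : Int) (x_move : Int) (y_move : Int) : Option (Int × Int × Int) :=
  pvLoopA x y x_begin x_move y_move (PySem.List.pyRange 0 9 1) x_begin y_begin

-- ===== PORT B =====
def define_square_alt (x : Int) (y : Int) (x_begin : Int) (y_begin : Int) (x_move : Int) (y_move : Int) : Option (Int × Int × Int) :=
  if x_move ≤ 0 ∨ y_move ≤ 0 then none
  else
    let col := PySem.Int.floordiv (x - x_begin) x_move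
    let cr  := PySem.Int.mod (x - x_begin) x_move
    let row := PySem.Int.floordiv (y - y_begin) y_move
    let rr  := PySem.Int.mod (y - y_begin) y_move
    if cr = 0 ∨ rr = 0 ∨ ¬ (0 ≤ col ∧ col ≤ 2 ∧ 0 ≤ row ∧ row ≤ 2) then none
    else some (row * 3 + col, x_begin + col * x_move, y_begin + row * y_move)

-- ===== PRECONDITION & SPEC =====
def Spec_define_square (x : Int) (y : Int) (x_begin : Int) (y_begin : Int) (x_move : Int) (y_move : Int) (out : Option (Int × Int × Int)) : Prop := out = define_square_alt x y x_begin y_begin x_move y_move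
instance (x : Int) (y : Int) (x_begin : Int) (y_begin : Int) (x_move : Int) (y_move : Int) (out : Option (Int × Int × Int)) : Decidable (Spec_define_square x y x_begin y_begin x_move y_move out) := by unfold Spec_define_square; infer_instance

-- ===== CLAIM (what is proved, stated in full; the proofs are below) =====
def Claim_equal_define_square : Prop := ∀ (x : Int) (y : Int) (x_begin : Int) (y_begin : Int) (x_move : Int) (y_move : Int), Dom_define_square x y x_begin y_begin x_move y_move → Spec_define_square x y x_begin y_begin x_move y_move (define_square x y x_begin y_begin x_move y_move)

-- ===== LEMMAS AND PROOFS =====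

theorem pvRange9 : PySem.List.pyRange 0 9 1 = [0,1,2,3,4,5,6,7,8] := by decide

theorem pvAxisIff (d m q r c : Int) (hm : 0 < m) (hd : m * q + r = d)
    (h0 : 0 ≤ r) (h1 : r < m) :
    (c * m < d ∧ d < c * m + m) ↔ (q = c ∧ r ≠ 0) := by
  have hcm : c * m = m * c := mul_comm c m
  constructor
  · rintro ⟨a, b⟩
    have hq : q = c := by
      rcases lt_trichotomy q c with h | h | h
      · have h2 : m * (q + 1) ≤ m * c := mul_le_mul_of_nonneg_left (by omega) hm.le
        rw [mul_add, mul_one] at h2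
        exact absurd a (by linarith)
      · exact h
      · have h2 : m * (c + 1) ≤ m * q := mul_le_mul_of_nonneg_left (by omega) hm.le
        rw [mul_add, mul_one] at h2
        exact absurd b (by linarith)
    subst hq
    exact ⟨rfl, by intro h; rw [h] at hd; exact absurd a (by linarith)⟩
  · rintro ⟨rfl, hr⟩
    exact ⟨by omega, by linarith⟩

theorem pvConj4 {A B C D P Q R S : Prop} (h1 : A ∧ B ↔ P ∧ Q) (h2 : C ∧ D ↔ R ∧ S) :
    (A ∧ B ∧ C ∧ D) ↔ (P ∧ Q ∧ R ∧ S) := by tauto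

set_option maxHeartbeats 1000000 in
theorem loopA_char (x y xb yb xm ym qx qy rx ry : Int) (hx : 0 < xm) (hy : 0 < ym)
    (hrx0 : 0 ≤ rx) (hrx1 : rx < xm) (hry0 : 0 ≤ ry) (hry1 : ry < ym)
    (hdx : xm * qx + rx = x - xb) (hdy : ym * qy + ry = y - yb) :
    pvLoopA x y xb xm ym [0,1,2,3,4,5,6,7,8] xb yb =
      (if 0 ≤ qx ∧ qx ≤ 2 ∧ 0 ≤ qy ∧ qy ≤ 2 ∧ rx ≠ 0 ∧ ry ≠ 0 then
        some (qy * 3 + qx, xb + qx * xm, yb + qy * ym) else none) := by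
  have X0 : (xb < x ∧ x < xb + xm) ↔ (qx = 0 ∧ rx ≠ 0) := by
    have h := pvAxisIff (x - xb) xm qx rx 0 hx hdx hrx0 hrx1
    constructor
    · rintro ⟨a, b⟩; exact h.mp ⟨by linarith, by linarith⟩
    · intro hh; obtain ⟨a, b⟩ := h.mpr hh; exact ⟨by linarith, by linarith⟩
  have X1 : (xb + xm < x ∧ x < xb + xm + xm) ↔ (qx = 1 ∧ rx ≠ 0) := by
    have h := pvAxisIff (x - xb) xm qx rx 1 hx hdx hrx0 hrx1
    constructor
    · rintro ⟨a, b⟩; exact h.mp ⟨by linarith, by linarith⟩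
    · intro hh; obtain ⟨a, b⟩ := h.mpr hh; exact ⟨by linarith, by linarith⟩
  have X2 : (xb + xm + xm < x ∧ x < xb + xm + xm + xm) ↔ (qx = 2 ∧ rx ≠ 0) := by
    have h := pvAxisIff (x - xb) xm qx rx 2 hx hdx hrx0 hrx1
    constructor
    · rintro ⟨a, b⟩; exact h.mp ⟨by linarith, by linarith⟩
    · intro hh; obtain ⟨a, b⟩ := h.mpr hh; exact ⟨by linarith, by linarith⟩
  have Y0 : (yb < y ∧ y < yb + ym) ↔ (qy = 0 ∧ ry ≠ 0) := by
    have h := pvAxisIff (y - yb) ym qy ry 0 hy hdy hry0 hry1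
    constructor
    · rintro ⟨a, b⟩; exact h.mp ⟨by linarith, by linarith⟩
    · intro hh; obtain ⟨a, b⟩ := h.mpr hh; exact ⟨by linarith, by linarith⟩
  have Y1 : (yb + ym < y ∧ y < yb + ym + ym) ↔ (qy = 1 ∧ ry ≠ 0) := by
    have h := pvAxisIff (y - yb) ym qy ry 1 hy hdy hry0 hry1
    constructor
    · rintro ⟨a, b⟩; exact h.mp ⟨by linarith, by linarith⟩
    · intro hh; obtain ⟨a, b⟩ := h.mpr hh; exact ⟨by linarith, by linarith⟩
  have Y2 : (yb + ym + ym < y ∧ y < yb + ym + ym + ym) ↔ (qy = 2 ∧ ry ≠ 0) := by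
    have h := pvAxisIff (y - yb) ym qy ry 2 hy hdy hry0 hry1
    constructor
    · rintro ⟨a, b⟩; exact h.mp ⟨by linarith, by linarith⟩
    · intro hh; obtain ⟨a, b⟩ := h.mpr hh; exact ⟨by linarith, by linarith⟩
  simp only [pvLoopA]
  norm_num
  simp only [pvConj4 X0 Y0, pvConj4 X1 Y0, pvConj4 X2 Y0,
      pvConj4 X0 Y1, pvConj4 X1 Y1, pvConj4 X2 Y1,
      pvConj4 X0 Y2, pvConj4 X1 Y2, pvConj4 X2 Y2]
  clear X0 X1 X2 Y0 Y1 Y2 hdx hdy hrx0 hrx1 hry0 hry1 hx hy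
  by_cases hB : 0 ≤ qx ∧ qx ≤ 2 ∧ 0 ≤ qy ∧ qy ≤ 2 ∧ ¬rx = 0 ∧ ¬ry = 0
  · rw [if_pos hB]
    obtain ⟨h1, h2, h3, h4, hrx, hry⟩ := hB
    have hqx3 : qx = 0 ∨ qx = 1 ∨ qx = 2 := by omega
    have hqy3 : qy = 0 ∨ qy = 1 ∨ qy = 2 := by omega
    clear h1 h2 h3 h4
    rcases hqx3 with rfl | rfl | rfl <;> rcases hqy3 with rfl | rfl | rfl <;>
      norm_num [hrx, hry] <;> omega
  · rw [if_neg hB,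
        if_neg (show ¬(qx = 0 ∧ ¬rx = 0 ∧ qy = 0 ∧ ¬ry = 0) by omega),
        if_neg (show ¬(qx = 1 ∧ ¬rx = 0 ∧ qy = 0 ∧ ¬ry = 0) by omega),
        if_neg (show ¬(qx = 2 ∧ ¬rx = 0 ∧ qy = 0 ∧ ¬ry = 0) by omega),
        if_neg (show ¬(qx = 0 ∧ ¬rx = 0 ∧ qy = 1 ∧ ¬ry = 0) by omega),
        if_neg (show ¬(qx = 1 ∧ ¬rx = 0 ∧ qy = 1 ∧ ¬ry = 0) by omega),
        if_neg (show ¬(qx = 2 ∧ ¬rx = 0 ∧ qy = 1 ∧ ¬ry = 0) by omega),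
        if_neg (show ¬(qx = 0 ∧ ¬rx = 0 ∧ qy = 2 ∧ ¬ry = 0) by omega),
        if_neg (show ¬(qx = 1 ∧ ¬rx = 0 ∧ qy = 2 ∧ ¬ry = 0) by omega),
        if_neg (show ¬(qx = 2 ∧ ¬rx = 0 ∧ qy = 2 ∧ ¬ry = 0) by omega)]

-- ===== VERDICT (by name: the statement is the Claim_ definition above) =====
set_option maxHeartbeats 1000000 in
theorem define_square_spec : Claim_equal_define_square := by
  intro x y xb yb xm ym _
  unfold Spec_define_square
  by_cases hpos : 0 < xm ∧ 0 < ym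
  · obtain ⟨hx, hy⟩ := hpos
    have hBx := PySem.Int.floordiv_eq_ediv_of_pos (a := x - xb) hx
    have hBy := PySem.Int.floordiv_eq_ediv_of_pos (a := y - yb) hy
    have hMx := PySem.Int.mod_eq_emod_of_pos (a := x - xb) hx
    have hMy := PySem.Int.mod_eq_emod_of_pos (a := y - yb) hy
    have hdx : xm * ((x - xb) / xm) + (x - xb) % xm = x - xb := Int.mul_ediv_add_emod _ _
    have hdy : ym * ((y - yb) / ym) + (y - yb) % ym = y - yb := Int.mul_ediv_add_emod _ _
    have hrx0 : 0 ≤ (x - xb) % xm := Int.emod_nonneg _ (ne_of_gt hx)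
    have hrx1 : (x - xb) % xm < xm := Int.emod_lt_of_pos _ hx
    have hry0 : 0 ≤ (y - yb) % ym := Int.emod_nonneg _ (ne_of_gt hy)
    have hry1 : (y - yb) % ym < ym := Int.emod_lt_of_pos _ hy
    rw [define_square, pvRange9,
        loopA_char x y xb yb xm ym _ _ _ _ hx hy hrx0 hrx1 hry0 hry1 hdx hdy]
    simp only [define_square_alt, hBx, hBy, hMx, hMy,
      if_neg (show ¬ (xm ≤ 0 ∨ ym ≤ 0) by omega)]
    set qx := (x - xb) / xm
    set rx := (x - xb) % xm
    set qy := (y - yb) / ym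
    set ry := (y - yb) % ym
    clear_value qx rx qy ry
    clear hdx hdy hBx hBy hMx hMy hrx0 hrx1 hry0 hry1 hx hy
    split_ifs with h1 h2 h2 <;> first | rfl | (exfalso; omega)
  · have h0 : xm ≤ 0 ∨ ym ≤ 0 := by omega
    simp only [define_square, pvRange9, define_square_alt, if_pos h0, pvLoopA]
    norm_num
    rw [if_neg (show ¬(xb < x ∧ x < xb + xm ∧ yb < y ∧ y < yb + ym) by omega),
        if_neg (show ¬(xb + xm < x ∧ x < xb + xm + xm ∧ yb < y ∧ y < yb + ym) by omega),
        if_neg (show ¬(xb + xm + xm < x ∧ x < xb + xm + xm + xm ∧ yb < y ∧ y < yb + ym) by omega),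
        if_neg (show ¬(xb < x ∧ x < xb + xm ∧ yb + ym < y ∧ y < yb + ym + ym) by omega),
        if_neg (show ¬(xb + xm < x ∧ x < xb + xm + xm ∧ yb + ym < y ∧ y < yb + ym + ym) by omega),
        if_neg (show ¬(xb + xm + xm < x ∧ x < xb + xm + xm + xm ∧ yb + ym < y ∧ y < yb + ym + ym) by omega),
        if_neg (show ¬(xb < x ∧ x < xb + xm ∧ yb + ym + ym < y ∧ y < yb + ym + ym + ym) by omega),
        if_neg (show ¬(xb + xm < x ∧ x < xb + xm + xm ∧ yb + ym + ym < y ∧ y < yb + ym + ym + ym) by omega),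
        if_neg (show ¬(xb + xm + xm < x ∧ x < xb + xm + xm + xm ∧ yb + ym + ym < y ∧ y < yb + ym + ym + ym) by omega)]
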